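-- pv_equiv track=rewrite | github.com/dandavison/misc-python | hired_binary_tree_size.py | solution
-- ===== SOURCE A (Python) =====
-- def solution(arr):
--     sums = {"left": 0, "right": 0}
--
--     def result():
--         if sums["left"] < sums["right"]:
--             return "Right"
--         elif sums["left"] == sums["right"]:
--             return ""
--         else:
--             return "Left"
--
--
--     level = 1
--     i = 1
--     while True:
--         for side in ["left", "right"]:
--             for _ in range(2 ** (level - 1)):
--                 if i == len(arr):
--                     return result()
--                 if arr[i] > 0:
--                     sums[side] += arr[i]
--                 i += 1
--         level += 1
-- ===== SOURCE B (Python) =====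
-- def solution(arr):
--     left = 0
--     right = 0
--     for i in range(1, len(arr)):
--         v = arr[i]
--         if v > 0:
--             j = i
--             while j > 2:
--                 j = (j - 1) // 2
--             if j == 1:
--                 left += v
--             else:
--                 right += v
--     if left < right:
--         return "Right"
--     elif left == right:
--         return ""
--     else:
--         return "Left"
-- ===== Notes on version B (the rewrite author's own statement) =====
-- stated objective: simpler
-- what changed: Replaces the level-by-level walk over halves of size 2^(level-1) by a single pass over indices 1..n-1 that classifies each index to the left or right subtree by walking parent links j=(j-1)//2 down to 1 or 2.
-- crash fix: On the empty list A raises IndexError (it reads arr[1]); B returns ''. — e.g. on solution([]): A raises IndexError, B returns ""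
import Mathlib
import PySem

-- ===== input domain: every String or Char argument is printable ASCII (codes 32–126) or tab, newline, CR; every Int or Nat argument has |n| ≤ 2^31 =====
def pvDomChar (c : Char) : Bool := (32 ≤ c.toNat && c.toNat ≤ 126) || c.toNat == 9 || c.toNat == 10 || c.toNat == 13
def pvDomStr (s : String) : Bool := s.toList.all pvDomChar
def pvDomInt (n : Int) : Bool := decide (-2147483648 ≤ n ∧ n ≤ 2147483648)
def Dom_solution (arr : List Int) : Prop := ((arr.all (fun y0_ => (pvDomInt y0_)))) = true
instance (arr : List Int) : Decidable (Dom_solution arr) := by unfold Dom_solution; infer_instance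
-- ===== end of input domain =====

-- B replaces A's level-by-level index walk by a single pass that classifies each index
-- by walking parent links to 1 or 2; equally costly, but shorter and plainer.

-- ===== PORT A =====
-- the inner closure `result()` of A
def resultOfA (sL sR : Int) : String :=
  if sL < sR then "Right" else if sL = sR then "" else "Left"

-- `for _ in range(cnt)` body of A: .inl r = early `return` (none = IndexError), .inr = fall through
def innerA (arr : List Int) (isLeft : Bool) : Nat → Int → Int → Nat → (Option String) ⊕ (Int × Int × Nat)
  | 0, sL, sR, i => .inr (sL, sR, i)
  | cnt + 1, sL, sR, i =>
    if i = arr.length then .inl (some (resultOfA sL sR)) else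
      match PySem.List.pyGet? arr (i : Int) with
      | none => .inl none   -- IndexError (reachable only for arr = [])
      | some v =>
        if v > 0 then
          if isLeft then innerA arr isLeft cnt (sL + v) sR (i + 1)
          else innerA arr isLeft cnt sL (sR + v) (i + 1)
        else innerA arr isLeft cnt sL sR (i + 1)

-- the `while True` loop of A, fueled (fuel arr.length + 1 always suffices, see proofs)
def outerA (arr : List Int) : Nat → Nat → Int → Int → Nat → Option String
  | 0, _, _, _, _ => none
  | fuel + 1, level, sL, sR, i =>
    match innerA arr true (2 ^ (level - 1)) sL sR i with
    | .inl r => r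
    | .inr (sL', sR', i') =>
      match innerA arr false (2 ^ (level - 1)) sL' sR' i' with
      | .inl r => r
      | .inr (sL'', sR'', i'') => outerA arr fuel (level + 1) sL'' sR'' i''

def solution (arr : List Int) : String :=
  (outerA arr (arr.length + 1) 1 0 0 1).getD ""   -- getD never used under Pre_ (arr ≠ [])

-- ===== PORT B =====
-- `while j > 2: j = (j - 1) // 2` of B
def ancB (j : Int) : Int :=
  if h : j > 2 then ancB (PySem.Int.floordiv (j - 1) 2) else j
termination_by j.toNat
decreasing_by
  rw [PySem.Int.floordiv_eq_ediv_of_pos (by omega : (0:Int) < 2)]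
  omega

def solution_alt (arr : List Int) : String :=
  let p := (PySem.List.pyRange 1 (arr.length : Int) 1).foldl
    (fun (s : Int × Int) i =>
      match PySem.List.pyGet? arr i with
      | none => s   -- unreachable: i produced by range(1, len(arr))
      | some v =>
        if v > 0 then
          if ancB i = 1 then (s.1 + v, s.2) else (s.1, s.2 + v)
        else s) (0, 0)
  if p.1 < p.2 then "Right" else if p.1 = p.2 then "" else "Left"

-- ===== PRECONDITION & SPEC =====
-- Pre_ excludes exactly the empty list, on which A raises IndexError (it reads arr[1]).
def Pre_solution (arr : List Int) : Prop := arr ≠ []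
instance (arr : List Int) : Decidable (Pre_solution arr) := by unfold Pre_solution; infer_instance
def pvWitness_solution : List Int := [3, -1, 2, 5, -4]

-- On the empty list A raises IndexError (it reads arr[1]); B returns ''.
def Raises_solution (arr : List Int) : Prop := arr = []
instance (arr : List Int) : Decidable (Raises_solution arr) := by unfold Raises_solution; infer_instance
def pvRaiseWitness_solution : List Int := []
def pvRaiseWitnessOut_solution : String := ""

def Spec_solution (arr : List Int) (out : String) : Prop := out = solution_alt arr
instance (arr : List Int) (out : String) : Decidable (Spec_solution arr out) := by unfold Spec_solution; infer_instance

-- ===== CLAIM (what is proved, stated in full; the proofs are below) =====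
def Claim_equal_solution : Prop := ∀ (arr : List Int), Dom_solution arr → Pre_solution arr → Spec_solution arr (solution arr)
def Claim_raises_solution : Prop := (∀ (arr : List Int), Dom_solution arr → Raises_solution arr → ¬ Pre_solution arr) ∧ (Dom_solution (pvRaiseWitness_solution) ∧ Raises_solution (pvRaiseWitness_solution) ∧ solution_alt (pvRaiseWitness_solution) = pvRaiseWitnessOut_solution)

-- ===== LEMMAS AND PROOFS =====

-- Nat version of B's parent walk
def ancN (j : Nat) : Nat :=
  if h : j > 2 then ancN ((j - 1) / 2) else j
termination_by j
decreasing_by omega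

-- sum of the positive entries among arr[i..i+cnt)
def posSum (arr : List Int) : Nat → Nat → Int
  | _, 0 => 0
  | i, cnt + 1 => (if arr.getD i 0 > 0 then arr.getD i 0 else 0) + posSum arr (i + 1) cnt

-- left / right classified sums over arr[i..i+cnt)
def clL (arr : List Int) : Nat → Nat → Int
  | _, 0 => 0
  | i, cnt + 1 => (if arr.getD i 0 > 0 ∧ ancN i = 1 then arr.getD i 0 else 0) + clL arr (i + 1) cnt

def clR (arr : List Int) : Nat → Nat → Int
  | _, 0 => 0
  | i, cnt + 1 => (if arr.getD i 0 > 0 ∧ ancN i ≠ 1 then arr.getD i 0 else 0) + clR arr (i + 1) cnt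

theorem ancB_natCast (j : Nat) : ancB (j : Int) = (ancN j : Int) := by
  induction j using Nat.strong_induction_on with
  | _ j ih =>
    by_cases h : 2 < j
    · rw [ancB, ancN, dif_pos (by exact_mod_cast h : (2:Int) < (j:Int)), dif_pos h]
      rw [PySem.Int.floordiv_eq_ediv_of_pos (by omega : (0:Int) < 2)]
      have e : ((j:Int) - 1) / 2 = (((j - 1) / 2 : Nat) : Int) := by omega
      rw [e]
      exact ih _ (by omega)
    · rw [ancB, ancN, dif_neg (by exact_mod_cast h), dif_neg h]

theorem anc_left (ℓ o : Nat) (h : o < 2 ^ ℓ) : ancN (2 ^ (ℓ + 1) - 1 + o) = 1 := by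
  induction ℓ generalizing o with
  | zero =>
    interval_cases o
    rw [show 2 ^ (0 + 1) - 1 + 0 = 1 from by norm_num, ancN]
    norm_num
  | succ ℓ ih =>
    have h2 : 2 ^ (ℓ + 2) = 2 * 2 ^ (ℓ + 1) := by ring
    have h3 : 2 ^ (ℓ + 1) = 2 * 2 ^ ℓ := by ring
    have h4 : 1 ≤ 2 ^ ℓ := Nat.one_le_two_pow
    rw [ancN, dif_pos (by omega)]
    have e : (2 ^ (ℓ + 1 + 1) - 1 + o - 1) / 2 = 2 ^ (ℓ + 1) - 1 + o / 2 := by omega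
    rw [e]
    exact ih (o / 2) (by omega)

theorem anc_right (ℓ o : Nat) (h : o < 2 ^ ℓ) : ancN (2 ^ (ℓ + 1) - 1 + 2 ^ ℓ + o) = 2 := by
  induction ℓ generalizing o with
  | zero =>
    interval_cases o
    rw [show 2 ^ (0 + 1) - 1 + 2 ^ 0 + 0 = 2 from by norm_num, ancN]
    norm_num
  | succ ℓ ih =>
    have h2 : 2 ^ (ℓ + 2) = 2 * 2 ^ (ℓ + 1) := by ring
    have h3 : 2 ^ (ℓ + 1) = 2 * 2 ^ ℓ := by ring
    have h4 : 1 ≤ 2 ^ ℓ := Nat.one_le_two_pow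
    rw [ancN, dif_pos (by omega)]
    have e : (2 ^ (ℓ + 1 + 1) - 1 + 2 ^ (ℓ + 1) + o - 1) / 2 = 2 ^ (ℓ + 1) - 1 + 2 ^ ℓ + o / 2 := by
      omega
    rw [e]
    exact ih (o / 2) (by omega)

theorem clL_append (arr : List Int) (i a b : Nat) :
    clL arr i (a + b) = clL arr i a + clL arr (i + a) b := by
  induction a generalizing i with
  | zero => simp [clL]
  | succ a ih =>
    have e : a + 1 + b = (a + b) + 1 := by omega
    rw [e, clL, clL, ih (i + 1)]
    have e2 : i + 1 + a = i + (a + 1) := by omega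
    rw [e2]
    ring

theorem clR_append (arr : List Int) (i a b : Nat) :
    clR arr i (a + b) = clR arr i a + clR arr (i + a) b := by
  induction a generalizing i with
  | zero => simp [clR]
  | succ a ih =>
    have e : a + 1 + b = (a + b) + 1 := by omega
    rw [e, clR, clR, ih (i + 1)]
    have e2 : i + 1 + a = i + (a + 1) := by omega
    rw [e2]
    ring

theorem cl_all_left (arr : List Int) (i cnt : Nat) (h : ∀ t, t < cnt → ancN (i + t) = 1) :
    clL arr i cnt = posSum arr i cnt ∧ clR arr i cnt = 0 := by
  induction cnt generalizing i with
  | zero => exact ⟨rfl, rfl⟩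
  | succ cnt ih =>
    have h0 : ancN i = 1 := by simpa using h 0 (by omega)
    obtain ⟨e1, e2⟩ := ih (i + 1) (fun t ht => by
      have := h (t + 1) (by omega)
      rw [show i + 1 + t = i + (t + 1) from by omega]
      exact this)
    constructor
    · rw [clL, posSum, e1]
      simp [h0]
    · rw [clR, e2]
      simp [h0]

theorem cl_all_right (arr : List Int) (i cnt : Nat) (h : ∀ t, t < cnt → ancN (i + t) = 2) :
    clL arr i cnt = 0 ∧ clR arr i cnt = posSum arr i cnt := by
  induction cnt generalizing i with
  | zero => exact ⟨rfl, rfl⟩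
  | succ cnt ih =>
    have h0 : ancN i = 2 := by simpa using h 0 (by omega)
    obtain ⟨e1, e2⟩ := ih (i + 1) (fun t ht => by
      have := h (t + 1) (by omega)
      rw [show i + 1 + t = i + (t + 1) from by omega]
      exact this)
    constructor
    · rw [clL, e1]
      simp [h0]
    · rw [clR, posSum, e2]
      simp [h0]

theorem innerA_full (arr : List Int) (b : Bool) (cnt : Nat) (sL sR : Int) (i : Nat)
    (h : i + cnt ≤ arr.length) :
    innerA arr b cnt sL sR i =
      .inr (if b then sL + posSum arr i cnt else sL, if b then sR else sR + posSum arr i cnt, i + cnt) := by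
  induction cnt generalizing sL sR i with
  | zero =>
    rw [innerA]
    cases b <;> simp [posSum]
  | succ cnt ih =>
    have hi : i < arr.length := by omega
    have hg : PySem.List.pyGet? arr (i : Int) = some (arr.getD i 0) := by
      rw [PySem.List.pyGet?_natCast, List.getD_eq_getElem _ _ hi, List.getElem?_eq_getElem hi]
    rw [innerA, if_neg (by omega), hg]
    simp only []
    rw [posSum]
    by_cases hv : arr.getD i 0 > 0
    · simp only [if_pos hv]
      cases b
      · rw [if_neg (by simp), ih _ _ _ (by omega)]
        simp only [Bool.false_eq_true, if_false]
        refine congrArg _ (Prod.ext rfl (Prod.ext ?_ ?_)) <;> ring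
      · rw [if_pos rfl, ih _ _ _ (by omega)]
        simp only [if_true]
        refine congrArg _ (Prod.ext ?_ (Prod.ext rfl ?_)) <;> ring
    · rw [if_neg hv, ih _ _ _ (by omega)]
      have hz : (if arr.getD i 0 > 0 then arr.getD i 0 else 0) = 0 := by rw [if_neg hv]
      rw [hz]
      cases b <;> simp only [Bool.false_eq_true, if_false, if_true] <;>
        refine congrArg _ (Prod.ext ?_ (Prod.ext ?_ ?_)) <;> ring

theorem innerA_partial (arr : List Int) (b : Bool) (cnt : Nat) (sL sR : Int) (i : Nat)
    (h1 : i ≤ arr.length) (h2 : arr.length < i + cnt) :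
    innerA arr b cnt sL sR i =
      .inl (some (resultOfA (if b then sL + posSum arr i (arr.length - i) else sL)
                            (if b then sR else sR + posSum arr i (arr.length - i)))) := by
  induction cnt generalizing sL sR i with
  | zero => omega
  | succ cnt ih =>
    by_cases he : i = arr.length
    · rw [innerA, if_pos he, he, Nat.sub_self]
      cases b <;> simp [posSum]
    · have hi : i < arr.length := by omega
      have hg : PySem.List.pyGet? arr (i : Int) = some (arr.getD i 0) := by
        rw [PySem.List.pyGet?_natCast, List.getD_eq_getElem _ _ hi, List.getElem?_eq_getElem hi]
      rw [innerA, if_neg he, hg]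
      simp only []
      have hsub : arr.length - i = (arr.length - (i + 1)) + 1 := by omega
      rw [hsub, posSum]
      by_cases hv : arr.getD i 0 > 0
      · simp only [if_pos hv]
        cases b
        · rw [if_neg (by simp), ih _ _ _ (by omega) (by omega)]
          simp only [Bool.false_eq_true, if_false]
          refine congrArg _ (congrArg _ (congrArg _ ?_))
          ring
        · rw [if_pos rfl, ih _ _ _ (by omega) (by omega)]
          simp only [if_true]
          refine congrArg _ (congrArg _ (congrArg₂ _ ?_ rfl))
          ring
      · rw [if_neg hv, ih _ _ _ (by omega) (by omega)]
        have hz : (if arr.getD i 0 > 0 then arr.getD i 0 else 0) = 0 := by rw [if_neg hv]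
        rw [hz]
        cases b <;> simp only [Bool.false_eq_true, if_false, if_true] <;>
          refine congrArg _ (congrArg _ (congrArg₂ _ ?_ ?_)) <;> ring

theorem outerA_spec (arr : List Int) (fuel ℓ i : Nat) (sL sR : Int)
    (hi : i = 2 ^ (ℓ + 1) - 1) (hle : i ≤ arr.length) (hf : arr.length - i < fuel) :
    outerA arr fuel (ℓ + 1) sL sR i =
      some (resultOfA (sL + clL arr i (arr.length - i)) (sR + clR arr i (arr.length - i))) := by
  induction fuel generalizing ℓ i sL sR with
  | zero => omega
  | succ fuel ih =>
    have hp1 : 1 ≤ 2 ^ ℓ := Nat.one_le_two_pow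
    have hp2 : 2 ^ (ℓ + 1) = 2 * 2 ^ ℓ := by ring
    have hp3 : 2 ^ (ℓ + 2) = 2 * 2 ^ (ℓ + 1) := by ring
    rw [outerA]
    have hlev : ℓ + 1 - 1 = ℓ := by omega
    rw [hlev]
    by_cases hL : arr.length < i + 2 ^ ℓ
    · rw [innerA_partial arr true _ _ _ _ hle hL]
      simp only [if_true]
      obtain ⟨e1, e2⟩ := cl_all_left arr i (arr.length - i) (fun t ht => by
        rw [hi]
        exact anc_left ℓ t (by omega))
      rw [e1, e2, add_zero]
    · rw [innerA_full arr true _ _ _ _ (by omega)]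
      simp only [if_true]
      by_cases hR : arr.length < (i + 2 ^ ℓ) + 2 ^ ℓ
      · rw [innerA_partial arr false _ _ _ _ (by omega) hR]
        simp only [Bool.false_eq_true, if_false]
        have hsplit : arr.length - i = 2 ^ ℓ + (arr.length - (i + 2 ^ ℓ)) := by omega
        rw [hsplit, clL_append, clR_append]
        obtain ⟨a1, a2⟩ := cl_all_left arr i (2 ^ ℓ) (fun t ht => by
          rw [hi]
          exact anc_left ℓ t ht)
        obtain ⟨b1, b2⟩ := cl_all_right arr (i + 2 ^ ℓ) (arr.length - (i + 2 ^ ℓ)) (fun t ht => by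
          rw [hi]
          exact anc_right ℓ t (by omega))
        rw [a1, a2, b1, b2]
        refine congrArg _ (congrArg₂ _ ?_ ?_) <;> ring
      · rw [innerA_full arr false _ _ _ _ (by omega)]
        simp only [Bool.false_eq_true, if_false]
        rw [ih (ℓ + 1) (i + 2 ^ ℓ + 2 ^ ℓ) _ _ (by omega) (by omega) (by omega)]
        have hsplit : arr.length - i =
            2 ^ ℓ + (2 ^ ℓ + (arr.length - (i + 2 ^ ℓ + 2 ^ ℓ))) := by omega
        rw [hsplit, clL_append, clR_append, clL_append, clR_append]
        obtain ⟨a1, a2⟩ := cl_all_left arr i (2 ^ ℓ) (fun t ht => by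
          rw [hi]
          exact anc_left ℓ t ht)
        obtain ⟨b1, b2⟩ := cl_all_right arr (i + 2 ^ ℓ) (2 ^ ℓ) (fun t ht => by
          rw [hi]
          exact anc_right ℓ t ht)
        rw [a1, a2, b1, b2]
        refine congrArg _ (congrArg₂ _ ?_ ?_) <;> ring

theorem foldB (arr : List Int) (cnt : Nat) : ∀ (i : Nat) (sL sR : Int), i + cnt = arr.length →
    (PySem.List.pyRange (i : Int) (arr.length : Int) 1).foldl
      (fun (s : Int × Int) k =>
        match PySem.List.pyGet? arr k with
        | none => s
        | some v =>
          if v > 0 then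
            if ancB k = 1 then (s.1 + v, s.2) else (s.1, s.2 + v)
          else s) (sL, sR) = (sL + clL arr i cnt, sR + clR arr i cnt) := by
  induction cnt with
  | zero =>
    intro i sL sR hlen
    rw [PySem.List.pyRange_one_eq_nil (by omega)]
    simp [clL, clR]
  | succ cnt ih =>
    intro i sL sR hlen
    have hi : i < arr.length := by omega
    have hg : PySem.List.pyGet? arr (i : Int) = some (arr.getD i 0) := by
      rw [PySem.List.pyGet?_natCast, List.getD_eq_getElem _ _ hi, List.getElem?_eq_getElem hi]
    rw [PySem.List.pyRange_one_cons (by exact_mod_cast hi), List.foldl_cons, hg]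
    simp only []
    have hcast : ((i : Int) + 1) = ((i + 1 : Nat) : Int) := by push_cast; ring
    by_cases hv : arr.getD i 0 > 0
    · rw [if_pos hv]
      by_cases ha : ancB (i : Int) = 1
      · have haN : ancN i = 1 := by
          have := ancB_natCast i
          omega
        rw [if_pos ha, hcast, ih (i + 1) _ _ (by omega), clL, clR,
          if_pos (And.intro hv haN), if_neg (fun hc => hc.2 haN)]
        refine congrArg₂ _ ?_ ?_ <;> ring
      · have haN : ¬ ancN i = 1 := by
          have := ancB_natCast i
          omega
        rw [if_neg ha, hcast, ih (i + 1) _ _ (by omega), clL, clR,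
          if_neg (fun hc => haN hc.2), if_pos (And.intro hv haN)]
        refine congrArg₂ _ ?_ ?_ <;> ring
    · rw [if_neg hv, hcast, ih (i + 1) _ _ (by omega), clL, clR,
        if_neg (fun hc => hv hc.1), if_neg (fun hc => hv hc.1)]
      refine congrArg₂ _ ?_ ?_ <;> ring

-- ===== VERDICT (by name: the statement is the Claim_ definition above) =====
theorem foldB_one (arr : List Int) (h : 1 ≤ arr.length) :
    (PySem.List.pyRange 1 (arr.length : Int) 1).foldl
      (fun (s : Int × Int) k =>
        match PySem.List.pyGet? arr k with
        | none => s
        | some v =>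
          if v > 0 then
            if ancB k = 1 then (s.1 + v, s.2) else (s.1, s.2 + v)
          else s) (0, 0) = (clL arr 1 (arr.length - 1), clR arr 1 (arr.length - 1)) := by
  have hfold := foldB arr (arr.length - 1) 1 0 0 (by omega)
  push_cast at hfold
  rw [hfold]
  norm_num

theorem solution_spec : Claim_equal_solution := by
  intro arr _ hpre
  unfold Spec_solution solution
  have hlen : 1 ≤ arr.length := List.length_pos_iff.mpr hpre
  rw [show (1 : Nat) = 0 + 1 from rfl,
    outerA_spec arr (arr.length + (0 + 1)) 0 (0 + 1) 0 0 (by norm_num) (by omega) (by omega)]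
  simp only [Option.getD_some, zero_add]
  simp only [solution_alt, foldB_one arr hlen]
  rw [resultOfA]

@[simp] theorem solution_raises : Claim_raises_solution := by
  unfold Claim_raises_solution
  exact ⟨fun arr _ h => by simp [Raises_solution] at h; simp [Pre_solution, h], by decide⟩
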